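-- pv_equiv track=rewrite | github.com/NitipoomKlaynium/Code-Practice | Python/printbits.py | addbits
-- ===== SOURCE A (Python) =====
-- def addbits(bit, list = None) :
--     a = str(bit[0]) + '0'
--     b = str(bit[0]) + '1'
--     if list == None :
--         list = []
--     list.append(a)
--     list.append(b)
--     if len(bit) == 1 :
--         return list
--     return addbits(bit[1:], list)
-- ===== SOURCE B (Python) =====
-- def addbits(bit, list=None):
--     if list is None:
--         list = []
--     for x in bit:
--         list.append(str(x) + '0')
--         list.append(str(x) + '1')
--     return list
-- ===== Notes on version B (the rewrite author's own statement) =====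
-- stated objective: faster
-- what changed: Replaces the tail recursion with slice copies (bit[1:]) by a single explicit left-to-right loop appending str(x)+'0' and str(x)+'1' into the accumulator; Pre_ excludes only the empty bit list, on which A raises IndexError (B returns the accumulator unchanged there).
-- outside the precondition, e.g. on addbits([], None): A raises IndexError, B returns []
import Mathlib
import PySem

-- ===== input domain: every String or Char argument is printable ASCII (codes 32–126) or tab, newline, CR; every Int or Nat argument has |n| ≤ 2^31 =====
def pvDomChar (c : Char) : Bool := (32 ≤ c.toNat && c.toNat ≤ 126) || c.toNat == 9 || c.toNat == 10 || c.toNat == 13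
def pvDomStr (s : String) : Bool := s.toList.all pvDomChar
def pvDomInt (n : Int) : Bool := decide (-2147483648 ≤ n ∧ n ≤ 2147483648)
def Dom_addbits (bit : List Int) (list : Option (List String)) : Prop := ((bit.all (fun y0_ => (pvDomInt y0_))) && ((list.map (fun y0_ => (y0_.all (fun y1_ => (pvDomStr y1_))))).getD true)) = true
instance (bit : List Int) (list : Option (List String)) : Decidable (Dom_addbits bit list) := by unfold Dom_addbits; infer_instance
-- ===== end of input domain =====

-- B replaces A's slicing tail recursion by a single explicit loop over bit.
-- Both Pythons mutate the caller's accumulator list in place; the theorems here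
-- are about the return value only (the mutation is identical in both Pythons).

-- ===== PORT A =====
-- A: reads bit[0], appends str(bit[0])+'0' and str(bit[0])+'1', recurses on bit[1:].
-- bit = [] raises IndexError in Python (excluded by Pre_); the port returns [] there.
def addbits (bit : List Int) (list : Option (List String)) : List String :=
  match bit with
  | [] => []
  | x :: rest =>
    let a := PySem.Int.toStr x ++ "0"
    let b := PySem.Int.toStr x ++ "1"
    let l := (list.getD []) ++ [a] ++ [b]
    if rest = [] then l else addbits rest (some l)

-- ===== PORT B =====
-- B: initialize the accumulator, then one left-to-right loop appending the two strings per element.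
def addbits_alt (bit : List Int) (list : Option (List String)) : List String :=
  bit.foldl
    (fun acc x => acc ++ [PySem.Int.toStr x ++ "0", PySem.Int.toStr x ++ "1"])
    (list.getD [])

-- ===== PRECONDITION & SPEC =====
-- Pre_ excludes only bit = [], on which A raises IndexError (bit[0]).
def Pre_addbits (bit : List Int) (list : Option (List String)) : Prop := bit ≠ []
instance (bit : List Int) (list : Option (List String)) : Decidable (Pre_addbits bit list) := by unfold Pre_addbits; infer_instance
def pvWitness_addbits : List Int × Option (List String) := ([1, 2], some ["x"])

def Spec_addbits (bit : List Int) (list : Option (List String)) (out : List String) : Prop := out = addbits_alt bit list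
instance (bit : List Int) (list : Option (List String)) (out : List String) : Decidable (Spec_addbits bit list out) := by unfold Spec_addbits; infer_instance

-- ===== CLAIM (what is proved, stated in full; the proofs are below) =====
def Claim_equal_addbits : Prop := ∀ (bit : List Int) (list : Option (List String)), Dom_addbits bit list → Pre_addbits bit list → Spec_addbits bit list (addbits bit list)

-- ===== LEMMAS AND PROOFS =====
lemma addbits_eq_alt (bit : List Int) (list : Option (List String)) (h : bit ≠ []) :
    addbits bit list = addbits_alt bit list := by
  induction bit generalizing list with
  | nil => exact absurd rfl h
  | cons x rest ih =>
    simp only [addbits, addbits_alt, List.foldl_cons]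
    by_cases hr : rest = []
    · subst hr; simp
    · simp only [if_neg hr, ih (some _) hr, addbits_alt, Option.getD_some]
      simp

-- ===== VERDICT (by name: the statement is the Claim_ definition above) =====
theorem addbits_spec : Claim_equal_addbits := by
  intro bit list _ hpre
  exact addbits_eq_alt bit list hpre
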